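-- pv_equiv track=rewrite | github.com/BousquetSophie/Paris_8 | Python/Cryptographie/Partie 3/Exercice 5/question2.py | decouper_texte
-- ===== SOURCE A (Python) =====
-- def decouper_texte(texte):
-- 	lst_final = []
-- 	lst = []
-- 	a = len(texte)-1
--
-- 	if (len(texte)%2) == 0:
-- 		for i in range((len(texte))//2):
-- 			for j in range(2):
-- 				lst.append(texte[a])
-- 				a = a - 1
-- 			lst_final.append(lst)
-- 			lst = []
--
-- 	elif len(texte)%2 == 1:
-- 		for i in range(len(texte)//2):
-- 			for j in range(2):
-- 				lst.append(texte[a])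
-- 				a = a - 1
-- 			lst_final.append(lst)
-- 			lst = []
-- 		lst.append(texte[0])
-- 		lst.append(" ")
-- 		lst_final.append(lst)
--
-- 	return lst_final
-- ===== SOURCE B (Python) =====
-- def decouper_texte(texte):
--     start = len(texte) % 2
--     pairs = [[texte[i + 1], texte[i]] for i in range(start, len(texte) - 1, 2)]
--     pairs.reverse()
--     if start:
--         pairs.append([texte[0], " "])
--     return pairs
-- ===== Notes on version B (the rewrite author's own statement) =====
-- stated objective: alternative
-- what changed: B never touches the string backwards: a list comprehension collects forward chunks of the ORIGINAL string with the two characters swapped, the resulting list of pairs is reversed once, and the odd-length tail pair is appended last - instead of A's backward-decrementing character index with duplicated even/odd branches and a nested range(2) loop of single-character appends.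
import Mathlib
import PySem

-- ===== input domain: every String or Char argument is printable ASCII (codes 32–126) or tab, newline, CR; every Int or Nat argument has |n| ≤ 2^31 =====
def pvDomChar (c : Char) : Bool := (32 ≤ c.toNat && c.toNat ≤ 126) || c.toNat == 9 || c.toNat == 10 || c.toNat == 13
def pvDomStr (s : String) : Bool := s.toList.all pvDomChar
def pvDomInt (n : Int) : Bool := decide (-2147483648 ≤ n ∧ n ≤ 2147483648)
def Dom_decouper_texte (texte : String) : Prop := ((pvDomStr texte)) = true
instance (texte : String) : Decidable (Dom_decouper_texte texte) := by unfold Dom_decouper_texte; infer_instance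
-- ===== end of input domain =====

-- B collects forward chunks of the original string with the two characters swapped, reverses that
-- list of pairs once, and appends the odd tail last — no backward index, no reversed string; objective: alternative.

-- ===== PORT A =====
-- texte[a] is always in range in A's loops; the .getD ' ' default is unreachable.
def decouper_texte (texte : String) : List (List String) :=
  let n : Int := PySem.Str.len texte
  let lst_final : List (List String) := []
  let lst : List String := []
  let a : Int := n - 1
  if PySem.Int.mod n 2 == 0 then
    let r := (PySem.List.pyRange 0 (PySem.Int.floordiv n 2) 1).foldl
      (fun (st : List (List String) × List String × Int) _i =>
        let (lf, lst, a) := st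
        let (lst, a) := (PySem.List.pyRange 0 2 1).foldl
          (fun (st2 : List String × Int) _j =>
            let (lst, a) := st2
            (lst ++ [String.mk [(PySem.Str.pyGet? texte a).getD ' ']], a - 1)) (lst, a)
        (lf ++ [lst], ([] : List String), a)) (lst_final, lst, a)
    r.1
  else if PySem.Int.mod n 2 == 1 then
    let r := (PySem.List.pyRange 0 (PySem.Int.floordiv n 2) 1).foldl
      (fun (st : List (List String) × List String × Int) _i =>
        let (lf, lst, a) := st
        let (lst, a) := (PySem.List.pyRange 0 2 1).foldl
          (fun (st2 : List String × Int) _j =>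
            let (lst, a) := st2
            (lst ++ [String.mk [(PySem.Str.pyGet? texte a).getD ' ']], a - 1)) (lst, a)
        (lf ++ [lst], ([] : List String), a)) (lst_final, lst, a)
    let lst := r.2.1 ++ [String.mk [(PySem.Str.pyGet? texte 0).getD ' ']]
    let lst := lst ++ [" "]
    r.1 ++ [lst]
  else
    lst_final

-- ===== PORT B =====
-- B's comprehension walks forward over the original characters two per step, emitting the swapped
-- pair [texte[i+1], texte[i]]; ported as structural recursion consuming two characters per step
-- (the range starts at len%2, i.e. the first character is skipped when the length is odd).
def pvChunksB : List Char → List (List String)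
  | a :: b :: rest => [String.mk [b], String.mk [a]] :: pvChunksB rest
  | _ => []

def decouper_texte_alt (texte : String) : List (List String) :=
  let odd := PySem.Int.mod (PySem.Str.len texte) 2 == 1
  let body := if odd then texte.toList.drop 1 else texte.toList
  let pairs := (pvChunksB body).reverse
  if odd then
    pairs ++ [[String.mk [(PySem.Str.pyGet? texte 0).getD ' '], " "]]
  else
    pairs

-- ===== PRECONDITION & SPEC =====
def Spec_decouper_texte (texte : String) (out : List (List String)) : Prop := out = decouper_texte_alt texte
instance (texte : String) (out : List (List String)) : Decidable (Spec_decouper_texte texte out) := by unfold Spec_decouper_texte; infer_instance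

-- ===== CLAIM (what is proved, stated in full; the proofs are below) =====
def Claim_equal_decouper_texte : Prop := ∀ (texte : String), Dom_decouper_texte texte → Spec_decouper_texte texte (decouper_texte texte)

-- ===== LEMMAS AND PROOFS =====

-- pairs of the reversed string, used only to characterise A's backward loop
def pvPairsB : List Char → List (List String)
  | a :: b :: rest => [String.mk [a], String.mk [b]] :: pvPairsB rest
  | _ => []

-- one-character string A pushes: texte[a] (list-level)
def pvGetS (l : List Char) (i : Int) : String := String.mk [(PySem.List.pyGet? l i).getD ' ']

-- the pairs A's outer loop produces: k iterations starting at index a, stepping down by 2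
def pvQ (l : List Char) : Nat → Int → List (List String)
  | 0, _ => []
  | k + 1, a => [pvGetS l a, pvGetS l (a - 1)] :: pvQ l k (a - 2)

-- A's loop body ignores the range value, so the fold is iteration of one step
def pvStepN (l : List Char) : Nat → (List (List String) × List String × Int) → (List (List String) × List String × Int)
  | 0, st => st
  | k + 1, st => pvStepN l k (st.1 ++ [st.2.1 ++ [pvGetS l st.2.2] ++ [pvGetS l (st.2.2 - 1)]], [], st.2.2 - 2)

lemma pvFold_eq_stepN (texte : String) (L : List Int) (st : List (List String) × List String × Int) :
    L.foldl
      (fun (st : List (List String) × List String × Int) _i =>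
        let (lf, lst, a) := st
        let (lst, a) := (PySem.List.pyRange 0 2 1).foldl
          (fun (st2 : List String × Int) _j =>
            let (lst, a) := st2
            (lst ++ [String.mk [(PySem.Str.pyGet? texte a).getD ' ']], a - 1)) (lst, a)
        (lf ++ [lst], ([] : List String), a)) st
    = pvStepN texte.toList L.length st := by
  induction L generalizing st with
  | nil => rfl
  | cons x xs ih =>
    simp only [List.foldl_cons, List.length_cons, ih]
    have : PySem.List.pyRange 0 2 1 = [0, 1] := by decide
    rw [this]
    obtain ⟨lf, lst, a⟩ := st
    simp [pvStepN, pvGetS, PySem.Str.pyGet?, PySem.Chars.pyGet?]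
    ring_nf

lemma pvStepN_eq (l : List Char) (k : Nat) (lf : List (List String)) (a : Int) :
    pvStepN l k (lf, [], a) = (lf ++ pvQ l k a, [], a - 2 * k) := by
  induction k generalizing lf a with
  | zero => simp [pvStepN, pvQ]
  | succ k ih =>
    simp only [pvStepN, ih, pvQ]
    have harith : a - 2 - 2 * (k : Int) = a - 2 * ((k + 1 : Nat) : Int) := by push_cast; ring
    rw [harith]
    simp

-- pvQ only reads indices a, a-1, …, a-2k+1: appending on the right does not change it
lemma pvQ_append (k : Nat) (l ext : List Char) (a : Int)
    (h0 : 0 ≤ a - 2 * k + 1) (h1 : a < l.length) :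
    pvQ (l ++ ext) k a = pvQ l k a := by
  induction k generalizing a with
  | zero => rfl
  | succ k ih =>
    have hg : ∀ i : Int, 0 ≤ i → i < l.length → pvGetS (l ++ ext) i = pvGetS l i := by
      intro i hi hil
      unfold pvGetS
      rw [PySem.List.pyGet?_of_nonneg _ hi, PySem.List.pyGet?_of_nonneg _ hi,
        List.getElem?_append_left (by omega)]
    simp only [pvQ]
    rw [hg a (by push_cast at h0; omega) h1,
      hg (a - 1) (by push_cast at h0; omega) (by omega),
      ih (a - 2) (by push_cast at h0; omega) (by omega)]

lemma pvQ_eq_pairs : ∀ (k : Nat) (r : List Char),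
    (r.length = 2 * k ∨ r.length = 2 * k + 1) →
    pvQ r.reverse k ((r.length : Int) - 1) = pvPairsB r := by
  intro k
  induction k with
  | zero =>
    intro r hr
    match r, hr with
    | [], _ => rfl
    | [x], _ => rfl
    | x :: y :: r', hr =>
      exfalso
      simp only [List.length_cons] at hr
      omega
  | succ k ih =>
    intro r hr
    match r with
    | [] =>
      exfalso
      simp only [List.length_nil] at hr
      omega
    | [x] =>
      exfalso
      simp only [List.length_cons, List.length_nil] at hr
      omega
    | x :: y :: r' =>
      have hr' : r'.length = 2 * k ∨ r'.length = 2 * k + 1 := by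
        simp only [List.length_cons] at hr
        omega
      have hrev : (x :: y :: r').reverse = r'.reverse ++ [y, x] := by simp
      simp only [pvQ, pvPairsB, hrev]
      have hx : pvGetS (r'.reverse ++ [y, x]) ((r'.length : Int) + 2 - 1) = String.mk [x] := by
        unfold pvGetS
        rw [show ((r'.length : Int) + 2 - 1) = ((r'.length + 1 : Nat) : Int) by push_cast; ring,
          PySem.List.pyGet?_natCast]
        simp
      have hy : pvGetS (r'.reverse ++ [y, x]) ((r'.length : Int) + 2 - 1 - 1) = String.mk [y] := by
        unfold pvGetS
        rw [show ((r'.length : Int) + 2 - 1 - 1) = ((r'.length : Nat) : Int) by ring,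
          PySem.List.pyGet?_natCast]
        simp
      have htail : pvQ (r'.reverse ++ [y, x]) k ((r'.length : Int) + 2 - 1 - 2)
          = pvPairsB r' := by
        rcases Nat.eq_zero_or_pos k with hk | hk
        · subst hk
          match r', hr' with
          | [], _ => rfl
          | [z], _ => rfl
          | z :: w :: r'', h =>
            exfalso
            simp only [List.length_cons] at h
            omega
        · rw [pvQ_append k r'.reverse [y, x] _ (by omega)
            (by simp; omega)]
          have := ih r' hr'
          rw [show ((r'.length : Int) + 2 - 1 - 2) = ((r'.length : Int) - 1) by ring]
          exact this
      rw [show ((r'.length : Int) + 2 - 1) = (((x :: y :: r').length : Int) - 1) by simp; ring] at hx hy htail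
      rw [hx, hy, htail]

-- pvPairsB distributes over append when the left part has even length
lemma pvPairsB_append : ∀ (u v : List Char), u.length % 2 = 0 →
    pvPairsB (u ++ v) = pvPairsB u ++ pvPairsB v
  | [], v, _ => by simp [pvPairsB]
  | [x], v, h => by simp at h
  | x :: y :: u', v, h => by
    have h' : u'.length % 2 = 0 := by simp at h; omega
    simp only [List.cons_append, pvPairsB, pvPairsB_append u' v h', List.cons_append]

-- backward pairs of m = reversed swapped forward chunks of m, for even-length m
lemma pvPairs_rev_even : ∀ (m : List Char), m.length % 2 = 0 →
    pvPairsB m.reverse = (pvChunksB m).reverse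
  | [], _ => rfl
  | [x], h => by simp at h
  | a :: b :: m', h => by
    have h' : m'.length % 2 = 0 := by simp at h; omega
    have hrev : (a :: b :: m').reverse = m'.reverse ++ [b, a] := by simp
    rw [hrev, pvPairsB_append m'.reverse [b, a] (by simp; omega),
      pvPairs_rev_even m' h']
    simp [pvPairsB, pvChunksB]

lemma pvPairs_rev_odd (h : Char) (t : List Char) (ht : t.length % 2 = 0) :
    pvPairsB (h :: t).reverse = (pvChunksB t).reverse := by
  have hrev : (h :: t).reverse = t.reverse ++ [h] := by simp
  rw [hrev, pvPairsB_append t.reverse [h] (by simp; omega), pvPairs_rev_even t ht]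
  simp [pvPairsB]

lemma pv_main (texte : String) :
    decouper_texte texte = decouper_texte_alt texte := by
  unfold decouper_texte decouper_texte_alt
  set l := texte.toList with hl
  have hlen : PySem.Str.len texte = (l.length : Int) := PySem.Str.len_eq texte
  have hdiv : PySem.Int.floordiv ((l.length : Int)) 2 = ((l.length / 2 : Nat) : Int) := by
    exact_mod_cast PySem.Int.floordiv_natCast l.length 2
  have hlenR : (PySem.List.pyRange 0 ((l.length / 2 : Nat) : Int) 1).length = l.length / 2 := by
    rw [PySem.List.length_pyRange_one]
    omega
  have hQ := pvQ_eq_pairs (l.length / 2) l.reverse (by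
    simp only [List.length_reverse]
    omega)
  simp only [List.reverse_reverse, List.length_reverse] at hQ
  by_cases hpar : l.length % 2 = 0
  · -- even length
    have hmod : PySem.Int.mod ((l.length : Int)) 2 = 0 := by
      have h := PySem.Int.mod_natCast l.length 2
      rw [hpar] at h
      exact_mod_cast h
    simp only [hlen, hmod, hdiv]
    rw [if_pos (by decide), if_neg (by decide), if_neg (by decide)]
    rw [pvFold_eq_stepN, hlenR, pvStepN_eq, hQ, pvPairs_rev_even l hpar]
    simp
  · -- odd length
    have hpar1 : l.length % 2 = 1 := by omega
    have hmod : PySem.Int.mod ((l.length : Int)) 2 = 1 := by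
      have h := PySem.Int.mod_natCast l.length 2
      rw [hpar1] at h
      exact_mod_cast h
    simp only [hlen, hmod, hdiv]
    rw [if_neg (by decide), if_pos (by decide), if_pos (by decide), if_pos (by decide)]
    rw [pvFold_eq_stepN, hlenR, pvStepN_eq]
    match l, hpar1 with
    | h :: t, hpar1 =>
      have ht : t.length % 2 = 0 := by simp at hpar1; omega
      rw [← hl, hQ, pvPairs_rev_odd h t ht]
      simp

-- ===== VERDICT (by name: the statement is the Claim_ definition above) =====
theorem decouper_texte_spec : Claim_equal_decouper_texte := by
  intro texte _
  unfold Spec_decouper_texte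
  exact pv_main texte
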